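-- pv_equiv track=rewrite | github.com/volcengine/verl | atropos/environments/intern_bootcamp/internbootcamp_lib/internbootcamp/bootcamp/dbouncingboomerangs/dbouncingboomerangs.py | compute_a_values
-- ===== SOURCE A (Python) =====
-- def compute_a_values(n, solution):
--     target_set = set(solution)
--     computed_a = [0] * n
--     for c in range(n):
--         current_col = c + 1
--         hits = 0
--         direction = 'up'
--         current_r, current_c = n, current_col
--         visited = set()
--
--         while True:
--             if direction == 'up':
--                 found = None
--                 for r in range(current_r, 0, -1):
--                     if (r, current_c) in target_set and (r, current_c) not in visited:
--                         found = (r, current_c)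
--                         break
--                 if not found:
--                     break
--                 visited.add(found)
--                 hits += 1
--                 direction = 'right'
--                 current_r, current_c = found
--             elif direction == 'right':
--                 found = None
--                 for col in range(current_c + 1, n + 1):
--                     if (current_r, col) in target_set and (current_r, col) not in visited:
--                         found = (current_r, col)
--                         break
--                 if not found:
--                     break
--                 visited.add(found)
--                 hits += 1
--                 direction = 'down'
--                 current_r, current_c = found
--             elif direction == 'down':
--                 found = None
--                 for r in range(current_r + 1, n + 1):
--                     if (r, current_c) in target_set and (r, current_c) not in visited:
--                         found = (r, current_c)
--                         break
--                 if not found: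
--                     break
--                 visited.add(found)
--                 hits += 1
--                 direction = 'left'
--                 current_r, current_c = found
--             elif direction == 'left':
--                 found = None
--                 for col in range(current_c - 1, 0, -1):
--                     if (current_r, col) in target_set and (current_r, col) not in visited:
--                         found = (current_r, col)
--                         break
--                 if not found:
--                     break
--                 visited.add(found)
--                 hits += 1
--                 direction = 'up'
--                 current_r, current_c = found
--             else:
--                 break
--         computed_a[c] = hits
--     return computed_a
-- ===== SOURCE B (Python) =====
-- def compute_a_values(n, solution):
--     # Index targets per column / per row as sorted lists, then simulate each
--     # boomerang by scanning only the targets on the current line instead of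
--     # scanning every grid cell of the row/column range.
--     pts = {(r, c) for (r, c) in solution if 1 <= r <= n and 1 <= c <= n}
--     cols = {c for (_, c) in pts}
--     rows_by_col = {c: sorted(r for (r, cc) in pts if cc == c) for c in cols}
--     rows = {r for (r, _) in pts}
--     cols_by_row = {r: sorted(c for (rr, c) in pts if rr == r) for r in rows}
--
--     res = []
--     for start in range(1, n + 1):
--         hits = 0
--         d = 0  # 0 up, 1 right, 2 down, 3 left
--         r_cur, c_cur = n, start
--         visited = set()
--         while True:
--             if d == 0:
--                 nxt = None
--                 for r in reversed(rows_by_col.get(c_cur, [])):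
--                     if r <= r_cur and (r, c_cur) not in visited:
--                         nxt = (r, c_cur)
--                         break
--             elif d == 1:
--                 nxt = None
--                 for c in cols_by_row.get(r_cur, []):
--                     if c_cur < c and (r_cur, c) not in visited:
--                         nxt = (r_cur, c)
--                         break
--             elif d == 2:
--                 nxt = None
--                 for r in rows_by_col.get(c_cur, []):
--                     if r_cur < r and (r, c_cur) not in visited:
--                         nxt = (r, c_cur)
--                         break
--             else:
--                 nxt = None
--                 for c in reversed(cols_by_row.get(r_cur, [])):
--                     if c < c_cur and (r_cur, c) not in visited:
--                         nxt = (r_cur, c)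
--                         break
--             if nxt is None:
--                 break
--             visited.add(nxt)
--             r_cur, c_cur = nxt
--             hits += 1
--             d = (d + 1) % 4
--     # d cycles up -> right -> down -> left -> up, exactly A's direction chain
--         res.append(hits)
--     return res
-- ===== Notes on version B (the rewrite author's own statement) =====
-- stated objective: faster
-- what changed: Instead of scanning every grid cell of the row/column range on each bounce against a membership set, B precomputes sorted per-column and per-row lists of the in-grid targets once and each bounce scans only the targets on the current line, driven by a numeric direction with one shared update tail.
import Mathlib
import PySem

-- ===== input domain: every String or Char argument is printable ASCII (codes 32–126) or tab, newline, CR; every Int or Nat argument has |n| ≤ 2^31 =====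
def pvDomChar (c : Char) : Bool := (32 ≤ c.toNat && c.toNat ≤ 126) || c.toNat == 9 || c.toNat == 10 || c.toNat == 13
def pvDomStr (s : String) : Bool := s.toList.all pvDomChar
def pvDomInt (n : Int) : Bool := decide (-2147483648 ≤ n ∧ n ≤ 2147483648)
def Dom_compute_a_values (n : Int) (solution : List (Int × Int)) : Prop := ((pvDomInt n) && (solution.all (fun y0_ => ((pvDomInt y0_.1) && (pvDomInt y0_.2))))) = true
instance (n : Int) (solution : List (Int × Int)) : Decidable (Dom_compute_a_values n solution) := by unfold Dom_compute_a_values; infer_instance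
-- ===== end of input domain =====

-- B replaces A's per-bounce scans over whole grid ranges by per-row/per-column
-- sorted target lists, scanning only targets on the current line (objective: faster).

-- ===== PORT A =====
-- A's while-True loop; the fuel (|solution| + 1) only makes the recursion total:
-- each non-break iteration adds a fresh member of the target set to `visited`,
-- so at most |set(solution)| + 1 iterations ever run.
def pvALoop (n : Int) (T : PySem.Set (Int × Int)) (dir : String) (cr cc : Int)
    (vis : PySem.Set (Int × Int)) (hits : Int) : Nat → Int
  | 0 => hits
  | (fuel+1) =>
    if dir == "up" then
      match (PySem.List.pyRange cr 0 (-1)).find?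
          (fun r => T.contains (r, cc) && !(vis.contains (r, cc))) with
      | none => hits
      | some r => pvALoop n T "right" r cc (vis.add (r, cc)) (hits + 1) fuel
    else if dir == "right" then
      match (PySem.List.pyRange (cc + 1) (n + 1) 1).find?
          (fun c2 => T.contains (cr, c2) && !(vis.contains (cr, c2))) with
      | none => hits
      | some c2 => pvALoop n T "down" cr c2 (vis.add (cr, c2)) (hits + 1) fuel
    else if dir == "down" then
      match (PySem.List.pyRange (cr + 1) (n + 1) 1).find?
          (fun r => T.contains (r, cc) && !(vis.contains (r, cc))) with
      | none => hits
      | some r => pvALoop n T "left" r cc (vis.add (r, cc)) (hits + 1) fuel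
    else if dir == "left" then
      match (PySem.List.pyRange (cc - 1) 0 (-1)).find?
          (fun c2 => T.contains (cr, c2) && !(vis.contains (cr, c2))) with
      | none => hits
      | some c2 => pvALoop n T "up" cr c2 (vis.add (cr, c2)) (hits + 1) fuel
    else hits

def compute_a_values (n : Int) (solution : List (Int × Int)) : List Int :=
  let T := PySem.Set.ofList solution
  (PySem.List.pyRange 0 n 1).map
    (fun c => pvALoop n T "up" n (c + 1) PySem.Set.empty 0 (solution.length + 1))

-- ===== PORT B =====
-- B's while-True loop (directions 0 = up, 1 = right, 2 = down, 3 = left); same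
-- fuel rationale as pvALoop.
def pvBLoop (rbc cbr : PySem.Dict Int (List Int)) (d cr cc : Int)
    (vis : PySem.Set (Int × Int)) (hits : Int) : Nat → Int
  | 0 => hits
  | (fuel+1) =>
    let nxt : Option (Int × Int) :=
      if d == 0 then
        ((rbc.getD cc []).reverse.find?
          (fun r => decide (r ≤ cr) && !(vis.contains (r, cc)))).map (fun r => (r, cc))
      else if d == 1 then
        ((cbr.getD cr []).find?
          (fun c2 => decide (cc < c2) && !(vis.contains (cr, c2)))).map (fun c2 => (cr, c2))
      else if d == 2 then
        ((rbc.getD cc []).find?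
          (fun r => decide (cr < r) && !(vis.contains (r, cc)))).map (fun r => (r, cc))
      else
        ((cbr.getD cr []).reverse.find?
          (fun c2 => decide (c2 < cc) && !(vis.contains (cr, c2)))).map (fun c2 => (cr, c2))
    match nxt with
    | none => hits
    | some p => pvBLoop rbc cbr (PySem.Int.mod (d + 1) 4) p.1 p.2 (vis.add p) (hits + 1) fuel

def compute_a_values_alt (n : Int) (solution : List (Int × Int)) : List Int :=
  let pts : PySem.Set (Int × Int) := PySem.Set.ofList (solution.filter
    (fun p => decide (1 ≤ p.1) && decide (p.1 ≤ n) && decide (1 ≤ p.2) && decide (p.2 ≤ n)))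
  let cols : PySem.Set Int := PySem.Set.ofList (pts.map (fun p => p.2))
  let rbc : PySem.Dict Int (List Int) := PySem.Dict.ofList (cols.map
    (fun c => (c, PySem.List.sorted ((pts.filter (fun p => p.2 == c)).map (fun p => p.1)) (fun x => x) false)))
  let rows : PySem.Set Int := PySem.Set.ofList (pts.map (fun p => p.1))
  let cbr : PySem.Dict Int (List Int) := PySem.Dict.ofList (rows.map
    (fun r => (r, PySem.List.sorted ((pts.filter (fun p => p.1 == r)).map (fun p => p.2)) (fun x => x) false)))
  (PySem.List.pyRange 1 (n + 1) 1).map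
    (fun start => pvBLoop rbc cbr 0 n start PySem.Set.empty 0 (solution.length + 1))

-- ===== PRECONDITION & SPEC =====
def Spec_compute_a_values (n : Int) (solution : List (Int × Int)) (out : List Int) : Prop := out = compute_a_values_alt n solution
instance (n : Int) (solution : List (Int × Int)) (out : List Int) : Decidable (Spec_compute_a_values n solution out) := by unfold Spec_compute_a_values; infer_instance

-- ===== CLAIM (what is proved, stated in full; the proofs are below) =====
def Claim_equal_compute_a_values : Prop := ∀ (n : Int) (solution : List (Int × Int)), Dom_compute_a_values n solution → Spec_compute_a_values n solution (compute_a_values n solution)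

-- ===== LEMMAS AND PROOFS =====

-- two strictly descending lists with the same members coincide
lemma pv_desc_ext (l1 l2 : List Int) (h1 : l1.Pairwise (· > ·)) (h2 : l2.Pairwise (· > ·))
    (hm : ∀ x, x ∈ l1 ↔ x ∈ l2) : l1 = l2 := by
  have n1 : l1.Nodup := h1.imp (fun h => ne_of_gt h)
  have n2 : l2.Nodup := h2.imp (fun h => ne_of_gt h)
  exact List.Perm.eq_of_pairwise
    (fun a b _ _ hab hba => absurd hba (not_lt.mpr (le_of_lt hab)))
    h1 h2 ((List.perm_ext_iff_of_nodup n1 n2).2 hm)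

lemma pv_asc_ext (l1 l2 : List Int) (h1 : l1.Pairwise (· < ·)) (h2 : l2.Pairwise (· < ·))
    (hm : ∀ x, x ∈ l1 ↔ x ∈ l2) : l1 = l2 := by
  have n1 : l1.Nodup := h1.imp (fun h => ne_of_lt h)
  have n2 : l2.Nodup := h2.imp (fun h => ne_of_lt h)
  exact List.Perm.eq_of_pairwise
    (fun a b _ _ hab hba => absurd hba (not_lt.mpr (le_of_lt hab)))
    h1 h2 ((List.perm_ext_iff_of_nodup n1 n2).2 hm)

-- A's descending grid scan = B's reverse scan of the sorted per-line target list
lemma pv_find_desc (hi n : Int) (L : List Int) (q p : Int → Bool)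
    (hs : L.Pairwise (· < ·))
    (hmem : ∀ x : Int, x ∈ L ↔ (q x = true ∧ 1 ≤ x ∧ x ≤ n))
    (hhi : hi ≤ n) :
    (PySem.List.pyRange hi 0 (-1)).find? (fun x => q x && p x)
      = L.reverse.find? (fun x => decide (x ≤ hi) && p x) := by
  rw [← List.head?_filter, ← List.head?_filter]
  congr 1
  apply pv_desc_ext
  · apply List.Pairwise.filter
    rw [PySem.List.pyRange_neg_one_eq_reverse, List.pairwise_reverse]
    exact (PySem.List.pairwise_lt_pyRange_one _ _).imp (fun h => h)
  · apply List.Pairwise.filter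
    rw [List.pairwise_reverse]
    exact hs.imp (fun h => h)
  · intro x
    simp only [List.mem_filter, PySem.List.mem_pyRange_neg_one, List.mem_reverse, hmem,
      Bool.and_eq_true, decide_eq_true_eq]
    constructor
    · rintro ⟨⟨hx0, hxhi⟩, hq, hp⟩
      exact ⟨⟨hq, by omega, by omega⟩, ⟨by omega, hp⟩⟩
    · rintro ⟨⟨hq, h1, h2⟩, hle, hp⟩
      exact ⟨⟨by omega, hle⟩, hq, hp⟩

-- A's ascending grid scan = B's forward scan of the sorted per-line target list
lemma pv_find_asc (lo n : Int) (L : List Int) (q p : Int → Bool)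
    (hs : L.Pairwise (· < ·))
    (hmem : ∀ x : Int, x ∈ L ↔ (q x = true ∧ 1 ≤ x ∧ x ≤ n))
    (hlo : 0 ≤ lo) :
    (PySem.List.pyRange (lo + 1) (n + 1) 1).find? (fun x => q x && p x)
      = L.find? (fun x => decide (lo < x) && p x) := by
  rw [← List.head?_filter, ← List.head?_filter]
  congr 1
  apply pv_asc_ext
  · exact (PySem.List.pairwise_lt_pyRange_one _ _).filter _
  · exact hs.filter _
  · intro x
    simp only [List.mem_filter, PySem.List.mem_pyRange_one, hmem,
      Bool.and_eq_true, decide_eq_true_eq]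
    constructor
    · rintro ⟨⟨h1, h2⟩, hq, hp⟩
      exact ⟨⟨hq, by omega, by omega⟩, ⟨by omega, hp⟩⟩
    · rintro ⟨⟨hq, h1, h2⟩, hlt, hp⟩
      exact ⟨⟨by omega, by omega⟩, hq, hp⟩

-- lookup in a dict built from distinct keys by a comprehension
lemma pv_getD_ofList_map (K : List Int) (f : Int → List Int) (hK : K.Nodup) (c : Int) :
    (PySem.Dict.ofList (K.map (fun k => (k, f k)))).getD c [] = if c ∈ K then f c else [] := by
  have hof : PySem.Dict.ofList (K.map (fun k => (k, f k)))
      = K.foldl (fun d k => d.insert k (f k)) PySem.Dict.empty := by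
    show (K.map (fun k => (k, f k))).foldl (fun d p => d.insert p.1 p.2) PySem.Dict.empty = _
    rw [List.foldl_map]
  have hitems : (K.foldl (fun d k => d.insert k (f k)) PySem.Dict.empty).items
      = K.map (fun k => (k, f k)) := by
    have := PySem.Dict.items_foldl_insert_fresh K (fun k => k) f PySem.Dict.empty
      (fun a _ => by simp [PySem.Dict.contains_empty]) (by simpa using hK)
    simpa using this
  have hkeys : (K.foldl (fun d k => d.insert k (f k)) PySem.Dict.empty).keys = K := by
    show (K.foldl (fun d k => d.insert k (f k)) PySem.Dict.empty).items.map (·.1) = K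
    rw [hitems, List.map_map]
    exact List.map_id K
  rw [hof]
  by_cases hc : c ∈ K
  · rw [if_pos hc]
    exact PySem.Dict.getD_of_mem_items _ (by rw [hitems]; exact List.mem_map_of_mem hc)
      (by rw [hkeys]; exact hK) _
  · rw [if_neg hc]
    apply PySem.Dict.getD_of_not_contains
    rw [← Bool.not_eq_true]
    intro h
    exact hc (by rwa [PySem.Dict.contains_iff_mem_keys, hkeys] at h)

-- the two loops agree step for step
lemma pv_loop_eq (n : Int) (T : PySem.Set (Int × Int)) (rbc cbr : PySem.Dict Int (List Int))
    (HR : ∀ c : Int, (rbc.getD c []).Pairwise (· < ·) ∧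
      ∀ r : Int, r ∈ rbc.getD c [] ↔ (T.contains (r, c) = true ∧ 1 ≤ r ∧ r ≤ n ∧ 1 ≤ c ∧ c ≤ n))
    (HC : ∀ r : Int, (cbr.getD r []).Pairwise (· < ·) ∧
      ∀ c : Int, c ∈ cbr.getD r [] ↔ (T.contains (r, c) = true ∧ 1 ≤ r ∧ r ≤ n ∧ 1 ≤ c ∧ c ≤ n)) :
    ∀ (fuel : Nat) (dir : String) (d cr cc : Int) (vis : PySem.Set (Int × Int)) (hits : Int),
      ((d = 0 ∧ dir = "up") ∨ (d = 1 ∧ dir = "right") ∨ (d = 2 ∧ dir = "down") ∨ (d = 3 ∧ dir = "left")) →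
      1 ≤ cr → cr ≤ n → 1 ≤ cc → cc ≤ n →
      pvALoop n T dir cr cc vis hits fuel = pvBLoop rbc cbr d cr cc vis hits fuel := by
  intro fuel
  induction fuel with
  | zero =>
    intro dir d cr cc vis hits _ _ _ _ _
    simp [pvALoop, pvBLoop]
  | succ fuel ih =>
    intro dir d cr cc vis hits hd h1 h2 h3 h4
    rcases hd with ⟨hd, hdir⟩ | ⟨hd, hdir⟩ | ⟨hd, hdir⟩ | ⟨hd, hdir⟩ <;> subst hd <;> subst hdir <;>
      simp only [pvALoop, pvBLoop, beq_self_eq_true, if_true]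
    -- up
    · have hmem : ∀ r : Int, r ∈ rbc.getD cc [] ↔
          ((fun r => T.contains (r, cc)) r = true ∧ 1 ≤ r ∧ r ≤ n) := by
        intro r
        rw [(HR cc).2 r]
        exact ⟨fun ⟨a, b, c, _, _⟩ => ⟨a, b, c⟩, fun ⟨a, b, c⟩ => ⟨a, b, c, h3, h4⟩⟩
      rw [show (PySem.List.pyRange cr 0 (-1)).find?
            (fun r => T.contains (r, cc) && !(vis.contains (r, cc)))
          = (rbc.getD cc []).reverse.find? (fun r => decide (r ≤ cr) && !(vis.contains (r, cc)))
        from pv_find_desc cr n (rbc.getD cc []) (fun r => T.contains (r, cc))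
          (fun r => !(vis.contains (r, cc))) (HR cc).1 hmem h2]
      cases hf : (rbc.getD cc []).reverse.find? (fun r => decide (r ≤ cr) && !(vis.contains (r, cc))) with
      | none => rfl
      | some r =>
        have hrmem : r ∈ rbc.getD cc [] := List.mem_reverse.1 (List.mem_of_find?_eq_some hf)
        have hb := ((HR cc).2 r).1 hrmem
        have hmod : PySem.Int.mod ((0 : Int) + 1) 4 = 1 := by decide
        simp only [Option.map_some, hmod]
        exact ih "right" 1 r cc (vis.add (r, cc)) (hits + 1)
          (Or.inr (Or.inl ⟨rfl, rfl⟩)) hb.2.1 hb.2.2.1 h3 h4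
    -- right
    · have hmem : ∀ c2 : Int, c2 ∈ cbr.getD cr [] ↔
          ((fun c2 => T.contains (cr, c2)) c2 = true ∧ 1 ≤ c2 ∧ c2 ≤ n) := by
        intro c2
        rw [(HC cr).2 c2]
        exact ⟨fun ⟨a, _, _, b, c⟩ => ⟨a, b, c⟩, fun ⟨a, b, c⟩ => ⟨a, h1, h2, b, c⟩⟩
      rw [show (PySem.List.pyRange (cc + 1) (n + 1) 1).find?
            (fun c2 => T.contains (cr, c2) && !(vis.contains (cr, c2)))
          = (cbr.getD cr []).find? (fun c2 => decide (cc < c2) && !(vis.contains (cr, c2)))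
        from pv_find_asc cc n (cbr.getD cr []) (fun c2 => T.contains (cr, c2))
          (fun c2 => !(vis.contains (cr, c2))) (HC cr).1 hmem (by omega)]
      cases hf : (cbr.getD cr []).find? (fun c2 => decide (cc < c2) && !(vis.contains (cr, c2))) with
      | none => rfl
      | some c2 =>
        have hb := ((HC cr).2 c2).1 (List.mem_of_find?_eq_some hf)
        have hmod : PySem.Int.mod ((1 : Int) + 1) 4 = 2 := by decide
        simp only [Option.map_some, hmod]
        exact ih "down" 2 cr c2 (vis.add (cr, c2)) (hits + 1)
          (Or.inr (Or.inr (Or.inl ⟨rfl, rfl⟩))) h1 h2 hb.2.2.2.1 hb.2.2.2.2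
    -- down
    · have hmem : ∀ r : Int, r ∈ rbc.getD cc [] ↔
          ((fun r => T.contains (r, cc)) r = true ∧ 1 ≤ r ∧ r ≤ n) := by
        intro r
        rw [(HR cc).2 r]
        exact ⟨fun ⟨a, b, c, _, _⟩ => ⟨a, b, c⟩, fun ⟨a, b, c⟩ => ⟨a, b, c, h3, h4⟩⟩
      rw [show (PySem.List.pyRange (cr + 1) (n + 1) 1).find?
            (fun r => T.contains (r, cc) && !(vis.contains (r, cc)))
          = (rbc.getD cc []).find? (fun r => decide (cr < r) && !(vis.contains (r, cc)))
        from pv_find_asc cr n (rbc.getD cc []) (fun r => T.contains (r, cc))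
          (fun r => !(vis.contains (r, cc))) (HR cc).1 hmem (by omega)]
      cases hf : (rbc.getD cc []).find? (fun r => decide (cr < r) && !(vis.contains (r, cc))) with
      | none => rfl
      | some r =>
        have hb := ((HR cc).2 r).1 (List.mem_of_find?_eq_some hf)
        have hmod : PySem.Int.mod ((2 : Int) + 1) 4 = 3 := by decide
        simp only [Option.map_some, hmod]
        exact ih "left" 3 r cc (vis.add (r, cc)) (hits + 1)
          (Or.inr (Or.inr (Or.inr ⟨rfl, rfl⟩))) hb.2.1 hb.2.2.1 h3 h4
    -- left
    · have hmem : ∀ c2 : Int, c2 ∈ cbr.getD cr [] ↔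
          ((fun c2 => T.contains (cr, c2)) c2 = true ∧ 1 ≤ c2 ∧ c2 ≤ n) := by
        intro c2
        rw [(HC cr).2 c2]
        exact ⟨fun ⟨a, _, _, b, c⟩ => ⟨a, b, c⟩, fun ⟨a, b, c⟩ => ⟨a, h1, h2, b, c⟩⟩
      have hpred : (fun c2 => decide (c2 ≤ cc - 1) && !(vis.contains (cr, c2)))
          = (fun c2 : Int => decide (c2 < cc) && !(vis.contains (cr, c2))) := by
        funext c2
        congr 1
        simp only [decide_eq_decide]
        omega
      rw [show (PySem.List.pyRange (cc - 1) 0 (-1)).find?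
            (fun c2 => T.contains (cr, c2) && !(vis.contains (cr, c2)))
          = (cbr.getD cr []).reverse.find? (fun c2 => decide (c2 < cc) && !(vis.contains (cr, c2)))
        from by
          rw [← hpred]
          exact pv_find_desc (cc - 1) n (cbr.getD cr []) (fun c2 => T.contains (cr, c2))
            (fun c2 => !(vis.contains (cr, c2))) (HC cr).1 hmem (by omega)]
      cases hf : (cbr.getD cr []).reverse.find? (fun c2 => decide (c2 < cc) && !(vis.contains (cr, c2))) with
      | none => rfl
      | some c2 =>
        have hb := ((HC cr).2 c2).1 (List.mem_reverse.1 (List.mem_of_find?_eq_some hf))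
        have hmod : PySem.Int.mod ((3 : Int) + 1) 4 = 0 := by decide
        simp only [Option.map_some, hmod]
        exact ih "up" 0 cr c2 (vis.add (cr, c2)) (hits + 1)
          (Or.inl ⟨rfl, rfl⟩) h1 h2 hb.2.2.2.1 hb.2.2.2.2

def pvPts (n : Int) (solution : List (Int × Int)) : PySem.Set (Int × Int) :=
  PySem.Set.ofList (solution.filter
    (fun p => decide (1 ≤ p.1) && decide (p.1 ≤ n) && decide (1 ≤ p.2) && decide (p.2 ≤ n)))

def pvRbc (n : Int) (solution : List (Int × Int)) : PySem.Dict Int (List Int) :=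
  PySem.Dict.ofList ((PySem.Set.ofList ((pvPts n solution).map (fun p => p.2))).map
    (fun c => (c, PySem.List.sorted (((pvPts n solution).filter (fun p => p.2 == c)).map (fun p => p.1)) (fun x => x) false)))

def pvCbr (n : Int) (solution : List (Int × Int)) : PySem.Dict Int (List Int) :=
  PySem.Dict.ofList ((PySem.Set.ofList ((pvPts n solution).map (fun p => p.1))).map
    (fun r => (r, PySem.List.sorted (((pvPts n solution).filter (fun p => p.1 == r)).map (fun p => p.2)) (fun x => x) false)))

lemma pv_mem_pts (n : Int) (solution : List (Int × Int)) (r c : Int) :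
    (r, c) ∈ pvPts n solution ↔ ((r, c) ∈ solution ∧ 1 ≤ r ∧ r ≤ n ∧ 1 ≤ c ∧ c ≤ n) := by
  unfold pvPts
  rw [PySem.Set.mem_ofList, List.mem_filter]
  simp; tauto

lemma pv_sorted_spec (pts : List (Int × Int)) (hnd : pts.Nodup) (key sel : (Int × Int) → Int)
    (hinj : ∀ p q : Int × Int, key p = key q → sel p = sel q → p = q) (k : Int) :
    (PySem.List.sorted ((pts.filter (fun p => key p == k)).map sel) (fun x => x) false).Pairwise (· < ·) ∧
    ∀ x : Int, (x ∈ PySem.List.sorted ((pts.filter (fun p => key p == k)).map sel) (fun x => x) false ↔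
      ∃ p ∈ pts, key p = k ∧ sel p = x) := by
  have hbase : ((pts.filter (fun p => key p == k)).map sel).Nodup := by
    apply List.Nodup.map_on _ (hnd.filter _)
    intro p hp q hq hsel
    have hpk : key p = k := by simpa using (List.mem_filter.1 hp).2
    have hqk : key q = k := by simpa using (List.mem_filter.1 hq).2
    exact hinj p q (hpk.trans hqk.symm) hsel
  have hperm := PySem.List.sorted_perm ((pts.filter (fun p => key p == k)).map sel) (fun x : Int => x) false
  constructor
  · have hle := PySem.List.sorted_pairwise ((pts.filter (fun p => key p == k)).map sel) (fun x : Int => x)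
    have hnds : (PySem.List.sorted ((pts.filter (fun p => key p == k)).map sel) (fun x => x) false).Nodup :=
      hperm.symm.nodup hbase
    exact (hle.and hnds).imp (fun h => lt_of_le_of_ne h.1 h.2)
  · intro x
    rw [PySem.List.mem_sorted]
    simp only [List.mem_map, List.mem_filter, beq_iff_eq]
    constructor
    · rintro ⟨p, ⟨hp, hk⟩, hs⟩
      exact ⟨p, hp, hk, hs⟩
    · rintro ⟨p, hp, hk, hs⟩
      exact ⟨p, ⟨hp, hk⟩, hs⟩

lemma pv_rbc_spec (n : Int) (solution : List (Int × Int)) (c : Int) :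
    ((pvRbc n solution).getD c []).Pairwise (· < ·) ∧
    ∀ r : Int, (r ∈ (pvRbc n solution).getD c [] ↔
      ((PySem.Set.ofList solution).contains (r, c) = true ∧ 1 ≤ r ∧ r ≤ n ∧ 1 ≤ c ∧ c ≤ n)) := by
  have hgd := pv_getD_ofList_map (PySem.Set.ofList ((pvPts n solution).map (fun p => p.2)))
    (fun c => PySem.List.sorted (((pvPts n solution).filter (fun p => p.2 == c)).map (fun p => p.1)) (fun x => x) false)
    (PySem.Set.nodup_ofList _) c
  have hspec := pv_sorted_spec (pvPts n solution) (PySem.Set.nodup_ofList _)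
    (fun p => p.2) (fun p => p.1) (fun p q h1 h2 => Prod.ext h2 h1) c
  have hmemiff : ∀ r : Int, ((∃ p ∈ pvPts n solution, p.2 = c ∧ p.1 = r) ↔
      ((PySem.Set.ofList solution).contains (r, c) = true ∧ 1 ≤ r ∧ r ≤ n ∧ 1 ≤ c ∧ c ≤ n)) := by
    intro r
    rw [PySem.Set.contains_iff, PySem.Set.mem_ofList]
    constructor
    · rintro ⟨p, hp, h2, h1⟩
      have hpe : p = (r, c) := Prod.ext h1 h2
      subst hpe
      exact (pv_mem_pts n solution r c).1 hp
    · intro h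
      exact ⟨(r, c), (pv_mem_pts n solution r c).2 h, rfl, rfl⟩
  unfold pvRbc
  rw [hgd]
  by_cases hc : c ∈ PySem.Set.ofList ((pvPts n solution).map (fun p => p.2))
  · rw [if_pos hc]
    exact ⟨hspec.1, fun r => (hspec.2 r).trans (hmemiff r)⟩
  · rw [if_neg hc]
    refine ⟨List.Pairwise.nil, fun r => ⟨fun h => False.elim (by simp at h), fun h => False.elim ?_⟩⟩
    rcases (hmemiff r).2 h with ⟨p, hp, h2, _⟩
    exact hc ((PySem.Set.mem_ofList _ _).2 (List.mem_map.2 ⟨p, hp, h2⟩))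

lemma pv_cbr_spec (n : Int) (solution : List (Int × Int)) (r : Int) :
    ((pvCbr n solution).getD r []).Pairwise (· < ·) ∧
    ∀ c : Int, (c ∈ (pvCbr n solution).getD r [] ↔
      ((PySem.Set.ofList solution).contains (r, c) = true ∧ 1 ≤ r ∧ r ≤ n ∧ 1 ≤ c ∧ c ≤ n)) := by
  have hgd := pv_getD_ofList_map (PySem.Set.ofList ((pvPts n solution).map (fun p => p.1)))
    (fun r => PySem.List.sorted (((pvPts n solution).filter (fun p => p.1 == r)).map (fun p => p.2)) (fun x => x) false)
    (PySem.Set.nodup_ofList _) r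
  have hspec := pv_sorted_spec (pvPts n solution) (PySem.Set.nodup_ofList _)
    (fun p => p.1) (fun p => p.2) (fun p q h1 h2 => Prod.ext h1 h2) r
  have hmemiff : ∀ c : Int, ((∃ p ∈ pvPts n solution, p.1 = r ∧ p.2 = c) ↔
      ((PySem.Set.ofList solution).contains (r, c) = true ∧ 1 ≤ r ∧ r ≤ n ∧ 1 ≤ c ∧ c ≤ n)) := by
    intro c
    rw [PySem.Set.contains_iff, PySem.Set.mem_ofList]
    constructor
    · rintro ⟨p, hp, h1, h2⟩
      have hpe : p = (r, c) := Prod.ext h1 h2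
      subst hpe
      exact (pv_mem_pts n solution r c).1 hp
    · intro h
      exact ⟨(r, c), (pv_mem_pts n solution r c).2 h, rfl, rfl⟩
  unfold pvCbr
  rw [hgd]
  by_cases hr : r ∈ PySem.Set.ofList ((pvPts n solution).map (fun p => p.1))
  · rw [if_pos hr]
    exact ⟨hspec.1, fun c => (hspec.2 c).trans (hmemiff c)⟩
  · rw [if_neg hr]
    refine ⟨List.Pairwise.nil, fun c => ⟨fun h => False.elim (by simp at h), fun h => False.elim ?_⟩⟩
    rcases (hmemiff c).2 h with ⟨p, hp, h1, _⟩
    exact hr ((PySem.Set.mem_ofList _ _).2 (List.mem_map.2 ⟨p, hp, h1⟩))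

theorem pv_main (n : Int) (solution : List (Int × Int)) :
    compute_a_values n solution = compute_a_values_alt n solution := by
  show (PySem.List.pyRange 0 n 1).map
      (fun c => pvALoop n (PySem.Set.ofList solution) "up" n (c + 1) PySem.Set.empty 0 (solution.length + 1))
    = (PySem.List.pyRange 1 (n + 1) 1).map
      (fun start => pvBLoop (pvRbc n solution) (pvCbr n solution) 0 n start PySem.Set.empty 0 (solution.length + 1))
  rw [PySem.List.pyRange_one 0 n, PySem.List.pyRange_one 1 (n + 1), List.map_map, List.map_map]
  rw [show (n + 1 - 1).toNat = (n - 0).toNat by norm_num]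
  apply List.map_congr_left
  intro k hk
  have hk' : (k : Int) < n := by
    have := List.mem_range.1 hk
    omega
  simp only [Function.comp]
  rw [show (0 : Int) + k + 1 = 1 + k by omega]
  exact pv_loop_eq n (PySem.Set.ofList solution) (pvRbc n solution) (pvCbr n solution)
    (pv_rbc_spec n solution) (pv_cbr_spec n solution)
    (solution.length + 1) "up" 0 n (1 + k) PySem.Set.empty 0
    (Or.inl ⟨rfl, rfl⟩) (by omega) (by omega) (by omega) (by omega)

-- ===== VERDICT (by name: the statement is the Claim_ definition above) =====
theorem compute_a_values_spec : Claim_equal_compute_a_values := by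
  intro n solution _
  exact pv_main n solution
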